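-- pv_equiv track=rewrite | github.com/sevimlikedicik/a2svRemote | june/codeforces_live_16_06_2022/3.py | solve
-- ===== SOURCE A (Python) =====
-- def solve(arr):
--     total = 0
--     last_index = 0
--     for i in range(len(arr)):
--         total += arr[i]
--         if total == 0:
--             last_index = i
--             break
--         if total < 0:
--             return False
--
--     for i in range(last_index + 1, len(arr)):
--         if arr[i] != 0:
--             return False
--
--     return total == 0
-- ===== SOURCE B (Python) =====
-- def solve(arr):
--     # strip trailing zeros: m-1 is the last non-zero index
--     m = len(arr)
--     while m > 0 and arr[m - 1] == 0:
--         m -= 1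
--     if m == 0:
--         return True
--     s = 0
--     for i in range(m - 1):
--         s += arr[i]
--         if s <= 0:
--             return False
--     return s + arr[m - 1] == 0
-- ===== Notes on version B (the rewrite author's own statement) =====
-- stated objective: alternative
-- what changed: B first strips trailing zeros from the back to find the last non-zero position m, then validates with a single forward prefix-sum pass over arr[:m] (positive before m, zero at m), instead of A's forward scan to the first zero prefix sum followed by a second index loop over the remaining suffix.
import Mathlib
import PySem

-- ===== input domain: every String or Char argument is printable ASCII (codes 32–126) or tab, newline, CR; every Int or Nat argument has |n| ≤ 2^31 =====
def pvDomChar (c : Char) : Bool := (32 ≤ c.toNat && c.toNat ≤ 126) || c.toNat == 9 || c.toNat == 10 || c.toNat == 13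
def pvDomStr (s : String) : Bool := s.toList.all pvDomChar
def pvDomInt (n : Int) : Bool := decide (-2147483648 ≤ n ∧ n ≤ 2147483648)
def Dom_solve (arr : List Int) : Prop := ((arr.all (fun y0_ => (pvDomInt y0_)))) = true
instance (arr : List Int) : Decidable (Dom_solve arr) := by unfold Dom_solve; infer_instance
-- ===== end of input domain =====

-- B strips trailing zeros from the back, then validates the front with one prefix-sum pass
-- (A instead scans forward to the first zero prefix sum and then checks the suffix): alternative decomposition, same cost.

-- ===== PORT A =====
-- first loop of A: returns none for `return False` (total < 0), otherwise some (total, last_index);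
-- i is the current absolute index (last_index stays 0 when the loop runs to the end without breaking)
def solveLoop1 : List Int → Int → Nat → Option (Int × Nat)
  | [], total, _ => some (total, 0)
  | x :: xs, total, i =>
      let t := total + x
      if t = 0 then some (t, i)
      else if t < 0 then none
      else solveLoop1 xs t (i + 1)

-- second loop of A over arr[last_index+1:], falling through to `return total == 0`
def solveLoop2 : List Int → Int → Bool
  | [], total => total == 0
  | x :: xs, total => if x ≠ 0 then false else solveLoop2 xs total

def solve (arr : List Int) : Bool :=
  match solveLoop1 arr 0 0 with
  | none => false
  | some (total, lastIndex) => solveLoop2 (arr.drop (lastIndex + 1)) total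

-- ===== PORT B =====
-- B's while loop: m counts down past trailing zeros (arr[m-1] is in range whenever consulted)
def stripLen (arr : List Int) : Nat → Nat
  | 0 => 0
  | m + 1 => if arr.getD m 0 = 0 then stripLen arr m else m + 1

-- B's for loop over range(m-1): none = early `return False` on a non-positive prefix sum
def fwdSums : List Int → Int → Option Int
  | [], s => some s
  | x :: xs, s =>
      let s' := s + x
      if s' ≤ 0 then none else fwdSums xs s'

def solve_alt (arr : List Int) : Bool :=
  let m := stripLen arr arr.length
  if m = 0 then true
  else
    match fwdSums (arr.take (m - 1)) 0 with
    | none => false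
    | some s => s + arr.getD (m - 1) 0 == 0

-- ===== PRECONDITION & SPEC =====
def Spec_solve (arr : List Int) (out : Bool) : Prop := out = solve_alt arr
instance (arr : List Int) (out : Bool) : Decidable (Spec_solve arr out) := by unfold Spec_solve; infer_instance

-- ===== CLAIM (what is proved, stated in full; the proofs are below) =====
def Claim_equal_solve : Prop := ∀ (arr : List Int), Dom_solve arr → Spec_solve arr (solve arr)

-- ===== LEMMAS AND PROOFS =====

-- reference forward recursion both ports are reduced to
def refRun : List Int → Int → Bool
  | [], s => s == 0
  | x :: xs, s =>
      let s' := s + x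
      if s' = 0 then solveLoop2 xs 0
      else if s' < 0 then false
      else refRun xs s'

theorem solveLoop2_ne_zero (l : List Int) (t : Int) (h : t ≠ 0) : solveLoop2 l t = false := by
  induction l with
  | nil => simpa [solveLoop2] using h
  | cons x xs ih =>
      simp only [solveLoop2]
      by_cases hx : x = 0
      · rw [if_neg (by simp [hx])]; exact ih
      · rw [if_pos hx]

-- index shift for A's first loop: valid as long as the running total starts positive
theorem solveLoop1_shift (xs : List Int) (t : Int) (i : Nat) (ht : 0 < t) :
    solveLoop1 xs t (i + 1) =
      (solveLoop1 xs t i).map (fun p => (p.1, if p.1 = 0 then p.2 + 1 else p.2)) := by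
  induction xs generalizing t i with
  | nil =>
      simp only [solveLoop1, Option.map_some]
      rw [if_neg (by omega : ¬ t = 0)]
  | cons x xs ih =>
      simp only [solveLoop1]
      by_cases h0 : t + x = 0
      · rw [if_pos h0, if_pos h0]; simp [h0]
      · rw [if_neg h0, if_neg h0]
        by_cases hneg : t + x < 0
        · rw [if_pos hneg, if_pos hneg]; rfl
        · rw [if_neg hneg, if_neg hneg]
          exact ih (t + x) (i + 1) (by omega)

theorem solveA_eq_refRun (xs : List Int) (s : Int) :
    (match solveLoop1 xs s 0 with
     | none => false
     | some (t, j) => solveLoop2 (xs.drop (j + 1)) t) = refRun xs s := by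
  induction xs generalizing s with
  | nil => simp [solveLoop1, refRun, solveLoop2]
  | cons x xs ih =>
      simp only [solveLoop1, refRun]
      by_cases h0 : s + x = 0
      · rw [if_pos h0, if_pos h0]; simp [h0]
      · rw [if_neg h0, if_neg h0]
        by_cases hneg : s + x < 0
        · rw [if_pos hneg, if_pos hneg]
        · rw [if_neg hneg, if_neg hneg]
          rw [show (0 : Nat) + 1 = 0 + 1 from rfl, solveLoop1_shift xs (s + x) 0 (by omega)]
          cases hl : solveLoop1 xs (s + x) 0 with
          | none => simpa [hl] using ih (s + x)
          | some p =>
              obtain ⟨v, j⟩ := p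
              have hIH := ih (s + x)
              rw [hl] at hIH
              simp only [Option.map_some]
              by_cases hv : v = 0
              · rw [if_pos hv]
                simpa [List.drop_succ_cons] using hIH
              · rw [if_neg hv]
                simp only [List.drop_succ_cons] at hIH ⊢
                rw [solveLoop2_ne_zero _ v hv] at hIH ⊢
                exact hIH

theorem solve_eq_refRun (arr : List Int) : solve arr = refRun arr 0 := by
  unfold solve
  simpa using solveA_eq_refRun arr 0

-- stripLen n = 0 iff the first n entries are all zero
theorem stripLen_eq_zero (arr : List Int) (n : Nat) :
    stripLen arr n = 0 ↔ ∀ j < n, arr.getD j 0 = 0 := by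
  induction n with
  | zero => simp [stripLen]
  | succ n ih =>
      simp only [stripLen]
      by_cases h : arr.getD n 0 = 0
      · rw [if_pos h, ih]
        constructor
        · intro hz j hj
          rcases Nat.lt_succ_iff_lt_or_eq.mp hj with hj | hj
          · exact hz j hj
          · rw [hj]; exact h
        · intro hz j hj; exact hz j (Nat.lt_succ_of_lt hj)
      · rw [if_neg h]
        constructor
        · intro hc; exact absurd hc (Nat.succ_ne_zero n)
        · intro hz; exact absurd (hz n (Nat.lt_succ_self n)) h

theorem solveLoop2_zero_iff (xs : List Int) :
    solveLoop2 xs 0 = true ↔ ∀ j < xs.length, xs.getD j 0 = 0 := by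
  induction xs with
  | nil => simp [solveLoop2]
  | cons x xs ih =>
      simp only [solveLoop2]
      by_cases h : x = 0
      · rw [if_neg (by simp [h]), ih]
        constructor
        · intro hz j hj
          cases j with
          | zero => simpa using h
          | succ j => simpa using hz j (by simpa using hj)
        · intro hz j hj
          simpa using hz (j + 1) (by simpa using Nat.succ_lt_succ hj)
      · rw [if_pos h]
        constructor
        · intro hc; exact absurd hc (by simp)
        · intro hz; exact absurd (by simpa using hz 0 (by simp)) h

theorem refRun_allZero (xs : List Int) (s : Int)
    (h : ∀ j < xs.length, xs.getD j 0 = 0) : refRun xs s = (s == 0) := by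
  induction xs generalizing s with
  | nil => simp [refRun]
  | cons x xs ih =>
      have hx : x = 0 := by simpa using h 0 (by simp)
      have hxs : ∀ j < xs.length, xs.getD j 0 = 0 := fun j hj => by
        simpa using h (j + 1) (by simpa using Nat.succ_lt_succ hj)
      simp only [refRun, hx, add_zero]
      by_cases hs : s = 0
      · rw [if_pos hs, (solveLoop2_zero_iff xs).mpr hxs]; simp [hs]
      · rw [if_neg hs]
        by_cases hn : s < 0
        · rw [if_pos hn]; simp [hs]
        · rw [if_neg hn, ih s hxs]

-- cons formula for B's while loop
theorem stripLen_cons (x : Int) (xs : List Int) (k : Nat) :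
    stripLen (x :: xs) (k + 1) =
      if stripLen xs k = 0 then (if x = 0 then 0 else 1) else stripLen xs k + 1 := by
  have step : ∀ (l : List Int) (n : Nat),
      stripLen l (n + 1) = if l.getD n 0 = 0 then stripLen l n else n + 1 := fun _ _ => rfl
  induction k with
  | zero =>
      by_cases hx : x = 0 <;> simp [stripLen, hx]
  | succ k ih =>
      rw [step (x :: xs) (k + 1), List.getD_cons_succ, step xs k]
      by_cases h : xs.getD k 0 = 0
      · simp only [if_pos h]; rw [ih]
      · simp only [if_neg h]
        rw [if_neg (Nat.succ_ne_zero k)]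

-- B's body generalized over the starting prefix sum
def bCore (xs : List Int) (s : Int) : Bool :=
  let m := stripLen xs xs.length
  if m = 0 then s == 0
  else
    match fwdSums (xs.take (m - 1)) s with
    | none => false
    | some t => t + xs.getD (m - 1) 0 == 0

theorem solve_alt_eq_bCore (arr : List Int) : solve_alt arr = bCore arr 0 := by
  simp [solve_alt, bCore]

theorem bCore_eq_refRun (xs : List Int) (s : Int) : bCore xs s = refRun xs s := by
  induction xs generalizing s with
  | nil => simp [bCore, stripLen, refRun]
  | cons x xs ih =>
      have hlen : (x :: xs).length = xs.length + 1 := rfl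
      unfold bCore
      rw [hlen, stripLen_cons]
      by_cases hz : stripLen xs xs.length = 0
      · -- xs is all zeros
        have hxs : ∀ j < xs.length, xs.getD j 0 = 0 := (stripLen_eq_zero xs xs.length).mp hz
        rw [if_pos hz]
        by_cases hx : x = 0
        · -- whole list all zeros
          rw [if_pos hx, if_pos rfl]
          have hall : ∀ j < (x :: xs).length, (x :: xs).getD j 0 = 0 := by
            intro j hj
            cases j with
            | zero => simpa using hx
            | succ j => simpa using hxs j (by simpa using hj)
          rw [refRun_allZero _ s hall]
        · -- m = 1
          rw [if_neg hx, if_neg (by omega : ¬ (1:Nat) = 0)]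
          simp only [Nat.sub_self, List.take_zero, fwdSums, List.getD_cons_zero]
          simp only [refRun]
          by_cases h0 : s + x = 0
          · rw [if_pos h0, (solveLoop2_zero_iff xs).mpr hxs]; simp [h0]
          · rw [if_neg h0]
            by_cases hneg : s + x < 0
            · rw [if_pos hneg]; simp [h0]
            · rw [if_neg hneg, refRun_allZero xs (s + x) hxs]
      · -- xs keeps a nonzero tail: m = stripLen xs + 1 ≥ 2
        obtain ⟨k, hk⟩ : ∃ k, stripLen xs xs.length = k + 1 :=
          ⟨stripLen xs xs.length - 1, by omega⟩
        rw [if_neg hz, hk, if_neg (by omega : ¬ (k + 1 + 1 : Nat) = 0)]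
        have htake : (x :: xs).take (k + 1 + 1 - 1) = x :: xs.take k := by simp
        rw [htake]
        simp only [fwdSums]
        by_cases hle : s + x ≤ 0
        · rw [if_pos hle]
          simp only [refRun]
          by_cases h0 : s + x = 0
          · have hnz : solveLoop2 xs 0 = false := by
              cases hsl : solveLoop2 xs 0 with
              | false => rfl
              | true => exact absurd ((solveLoop2_zero_iff xs).mp hsl) (by
                  intro hall
                  exact hz ((stripLen_eq_zero xs xs.length).mpr hall))
            rw [if_pos h0, hnz]
          · rw [if_neg h0, if_pos (by omega : s + x < 0)]
        · rw [if_neg hle]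
          simp only [refRun]
          rw [if_neg (by omega : ¬ s + x = 0), if_neg (by omega : ¬ s + x < 0)]
          have hIH := ih (s + x)
          unfold bCore at hIH
          rw [hk, if_neg (Nat.succ_ne_zero k)] at hIH
          simpa using hIH

-- ===== VERDICT (by name: the statement is the Claim_ definition above) =====
theorem solve_spec : Claim_equal_solve := by
  intro arr _
  unfold Spec_solve
  rw [solve_eq_refRun, solve_alt_eq_bCore, bCore_eq_refRun]
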